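-- pv_equiv track=rewrite | github.com/dengguojie/vue-element-admin | auto_schedule/python/tbe/dsl/unify_schedule/layer_norm_tilingcase.py | find_last_none_reduce_axis
-- ===== SOURCE A (Python) =====
-- from typing import List
-- from typing import Optional
-- from typing import Tuple
--
-- def find_last_none_reduce_axis(shape_before_reduce: list,
--                                reduce_axis_index: List[int]) -> Tuple[Optional[int], Optional[int]]:
--     """
--     :param shape_before_reduce
--     :param reduce_axis_index
--     :return the last axis or the last serials axises that are not in reduce_axis
--     """
--     #  shape_before_reduce:(a1,a2,a3,...,r2,r1), the last axis must be reduce axis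
--     # find a1 position, a1 may contain continues axis
--     a1_end_index = None
--     for i in range(len(shape_before_reduce) - 1, -1, -1):
--         if i not in reduce_axis_index:
--             a1_end_index = i
--             break
--     a1_start_index = a1_end_index
--     if a1_end_index is None:
--         return a1_start_index, a1_end_index
--     a1_start_index = 0
--
--     return a1_start_index, a1_end_index
-- ===== SOURCE B (Python) =====
-- def find_last_none_reduce_axis(shape_before_reduce, reduce_axis_index):
--     reduce_set = set(reduce_axis_index)
--     valid = [i for i in range(len(shape_before_reduce)) if i not in reduce_set]
--     if not valid:
--         return None, None
--     return 0, valid[-1]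
-- ===== Notes on version B (the rewrite author's own statement) =====
-- stated objective: alternative
-- what changed: Replaces the early-breaking backward scan with inner list-membership tests by one forward pass collecting all non-reduce indices against a prebuilt set, then selecting the last one (or (None, None) if none exist); it trades A's early exit for a full forward pass with O(1) membership.
import Mathlib
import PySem

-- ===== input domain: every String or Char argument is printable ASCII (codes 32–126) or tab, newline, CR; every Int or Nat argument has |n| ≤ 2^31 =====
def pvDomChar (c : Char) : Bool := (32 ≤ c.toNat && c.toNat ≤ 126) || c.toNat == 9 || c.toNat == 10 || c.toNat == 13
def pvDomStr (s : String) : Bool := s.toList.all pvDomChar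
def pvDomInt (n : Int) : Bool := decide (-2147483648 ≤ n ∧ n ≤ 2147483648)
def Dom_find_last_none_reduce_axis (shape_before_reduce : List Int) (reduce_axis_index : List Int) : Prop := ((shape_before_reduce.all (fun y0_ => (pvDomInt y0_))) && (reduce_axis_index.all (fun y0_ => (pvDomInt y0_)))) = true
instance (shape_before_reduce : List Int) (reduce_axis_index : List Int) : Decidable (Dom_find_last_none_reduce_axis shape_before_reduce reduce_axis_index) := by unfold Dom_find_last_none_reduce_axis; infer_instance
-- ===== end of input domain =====

-- B replaces A's early-breaking backward scan by a forward pass that collects all non-reduce indices (against a prebuilt set) and selects the last (objective: alternative).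

-- ===== PORT A =====
-- A's backward loop 'for i in range(n-1, -1, -1): if i not in reduce: a1_end_index = i; break',
-- transliterated as structural recursion on the counter: aScan n visits i = n-1, n-2, …, 0.
def aScan (reduce_axis_index : List Int) : Nat → Option Int
  | 0 => none
  | k + 1 => if reduce_axis_index.contains (k : Int) then aScan reduce_axis_index k else some (k : Int)

def find_last_none_reduce_axis (shape_before_reduce : List Int) (reduce_axis_index : List Int) : List (Option Int) :=
  let a1_end_index := aScan reduce_axis_index shape_before_reduce.length
  match a1_end_index with
  | none => [none, none]                -- a1_start_index = a1_end_index = None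
  | some e => [some 0, some e]          -- a1_start_index = 0

-- ===== PORT B =====
def find_last_none_reduce_axis_alt (shape_before_reduce : List Int) (reduce_axis_index : List Int) : List (Option Int) :=
  let reduce_set : PySem.Set Int := PySem.Set.ofList reduce_axis_index
  let valid := (List.range shape_before_reduce.length).filter
      (fun i => !(PySem.Set.contains reduce_set ((i : Nat) : Int)))
  match valid.getLast? with
  | none => [none, none]
  | some i => [some 0, some ((i : Nat) : Int)]

-- ===== PRECONDITION & SPEC =====
def Spec_find_last_none_reduce_axis (shape_before_reduce : List Int) (reduce_axis_index : List Int) (out : List (Option Int)) : Prop := out = find_last_none_reduce_axis_alt shape_before_reduce reduce_axis_index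
instance (shape_before_reduce : List Int) (reduce_axis_index : List Int) (out : List (Option Int)) : Decidable (Spec_find_last_none_reduce_axis shape_before_reduce reduce_axis_index out) := by unfold Spec_find_last_none_reduce_axis; infer_instance

-- ===== CLAIM (what is proved, stated in full; the proofs are below) =====
def Claim_equal_find_last_none_reduce_axis : Prop := ∀ (shape_before_reduce : List Int) (reduce_axis_index : List Int), Dom_find_last_none_reduce_axis shape_before_reduce reduce_axis_index → Spec_find_last_none_reduce_axis shape_before_reduce reduce_axis_index (find_last_none_reduce_axis shape_before_reduce reduce_axis_index)

-- ===== LEMMAS AND PROOFS =====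
-- B's membership test against the prebuilt set agrees with A's list membership test.
theorem filter_set_eq_filter_list (r : List Int) (n : Nat) :
    (List.range n).filter (fun i => !(PySem.Set.contains (PySem.Set.ofList r) ((i : Nat) : Int))) =
      (List.range n).filter (fun i => !(r.contains ((i : Nat) : Int))) := by
  apply List.filter_congr
  intro i _
  by_cases h : ((i : Nat) : Int) ∈ r
  · simp [PySem.Set.mem_ofList, h]
  · simp [PySem.Set.mem_ofList, h]

-- A's backward scan finds exactly the last element of B's filtered forward list.
theorem aScan_eq_getLast? (reduce_axis_index : List Int) (n : Nat) :
    aScan reduce_axis_index n =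
      (((List.range n).filter (fun i => !(reduce_axis_index.contains ((i : Nat) : Int)))).getLast?).map
        (fun i => ((i : Nat) : Int)) := by
  induction n with
  | zero => simp [aScan]
  | succ k ih =>
    rw [List.range_succ, List.filter_append, aScan]
    cases h : reduce_axis_index.contains ((k : Nat) : Int) with
    | true =>
      rw [if_pos rfl, ih, List.filter_cons_of_neg (by simpa using h), List.filter_nil,
        List.append_nil]
    | false =>
      rw [if_neg (by simp), List.filter_cons_of_pos (by simpa using h), List.filter_nil,
        List.getLast?_concat]
      rfl

-- ===== VERDICT (by name: the statement is the Claim_ definition above) =====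
theorem find_last_none_reduce_axis_spec : Claim_equal_find_last_none_reduce_axis := by
  intro s r _
  unfold Spec_find_last_none_reduce_axis find_last_none_reduce_axis find_last_none_reduce_axis_alt
  rw [aScan_eq_getLast?]
  simp only [filter_set_eq_filter_list]
  cases h : ((List.range s.length).filter (fun i => !(r.contains ((i : Nat) : Int)))).getLast? <;>
    · simp only [List.contains_eq_mem, List.getLast?_filter] at h
      simp [h]
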